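-- pv_equiv track=rewrite | github.com/denismerigoux/calculette-impots-m-language-parser | calculette_impots_m_language_parser/m_to_ast.py | pretty_ordered_keys
-- ===== SOURCE A (Python) =====
-- from collections import OrderedDict
--
-- def pretty_ordered_keys(dict_):
--     """Order keys for the JSON to be more readable by a human."""
--     def get_items(keys):
--         return [(key, dict_[key]) for key in keys if key in dict_]
--     assert isinstance(dict_, dict), dict_
--     first_keys = ['type', 'name']
--     last_keys = ['linecol']
--     other_keys = sorted(set(dict_.keys()).difference(first_keys, last_keys))
--     items = get_items(first_keys) + get_items(other_keys) + get_items(last_keys)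
--     return OrderedDict(items)
-- ===== SOURCE B (Python) =====
-- from collections import OrderedDict
--
--
-- def pretty_ordered_keys(dict_):
--     """Order keys for the JSON to be more readable by a human."""
--     assert isinstance(dict_, dict), dict_
--
--     def rank(key):
--         if key == 'type':
--             return '0'
--         if key == 'name':
--             return '1'
--         if key == 'linecol':
--             return '3'
--         return '2' + key
--
--     return OrderedDict((key, dict_[key]) for key in sorted(dict_, key=rank))
-- ===== Notes on version B (the rewrite author's own statement) =====
-- stated objective: simpler
-- what changed: Replaces the three filtered get_items passes plus a separate sorted(set-difference) with one stable sort of all keys under a composite string rank ('0' for type, '1' for name, '2'+key for others, '3' for linecol).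
import Mathlib
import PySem

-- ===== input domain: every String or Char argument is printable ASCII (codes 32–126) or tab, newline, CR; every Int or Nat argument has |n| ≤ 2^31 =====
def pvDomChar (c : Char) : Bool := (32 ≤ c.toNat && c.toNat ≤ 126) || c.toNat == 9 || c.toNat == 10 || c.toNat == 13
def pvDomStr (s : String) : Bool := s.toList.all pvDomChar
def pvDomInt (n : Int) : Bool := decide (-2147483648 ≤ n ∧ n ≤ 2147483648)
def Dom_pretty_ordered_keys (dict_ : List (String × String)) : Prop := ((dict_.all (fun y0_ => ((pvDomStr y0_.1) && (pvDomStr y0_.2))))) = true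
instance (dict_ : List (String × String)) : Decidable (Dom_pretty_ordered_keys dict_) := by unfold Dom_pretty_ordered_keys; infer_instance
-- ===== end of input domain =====

-- B replaces A's three filtered passes + sorted set-difference by one stable sort of all
-- keys under a composite string rank (simpler decomposition; same asymptotic cost).


-- ===== PORT A =====
-- literal transliteration of A: three comprehensions over filtered key groups,
-- middle group = sorted(set(dict_.keys()).difference(first_keys, last_keys)).
def pretty_ordered_keys (dict_ : List (String × String)) : List (String × String) :=
  let d := PySem.Dict.ofList dict_
  let get_items := fun (keys : List String) =>
    (keys.filter (fun k => d.contains k)).map (fun k => (k, d.getD k ""))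
  let first_keys : List String := ["type", "name"]
  let last_keys : List String := ["linecol"]
  let other_keys := PySem.List.sorted
    (PySem.Set.diff (PySem.Set.ofList d.keys) (first_keys ++ last_keys)) (fun x => x) false
  let items := get_items first_keys ++ get_items other_keys ++ get_items last_keys
  (PySem.Dict.ofList items).items

-- ===== PORT B =====
def pvRank (key : String) : String :=
  if key = "type" then "0"
  else if key = "name" then "1"
  else if key = "linecol" then "3"
  else "2" ++ key

def pretty_ordered_keys_alt (dict_ : List (String × String)) : List (String × String) :=
  let d := PySem.Dict.ofList dict_
  (PySem.Dict.ofList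
    ((PySem.List.sorted d.keys pvRank false).map (fun key => (key, d.getD key "")))).items

-- ===== PRECONDITION & SPEC =====
def Spec_pretty_ordered_keys (dict_ : List (String × String)) (out : List (String × String)) : Prop := out = pretty_ordered_keys_alt dict_
instance (dict_ : List (String × String)) (out : List (String × String)) : Decidable (Spec_pretty_ordered_keys dict_ out) := by unfold Spec_pretty_ordered_keys; infer_instance

-- ===== CLAIM (what is proved, stated in full; the proofs are below) =====
def Claim_equal_pretty_ordered_keys : Prop := ∀ (dict_ : List (String × String)), Dom_pretty_ordered_keys dict_ → Spec_pretty_ordered_keys dict_ (pretty_ordered_keys dict_)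

-- ===== LEMMAS AND PROOFS =====

-- String comparisons between the four rank groups ("0" < "1" < "2"++k < "3")
theorem pv02 (b : String) : "0" < "2" ++ b := by
  rw [String.lt_iff_toList_lt]; show List.lt _ _
  rw [List.lt_iff_lex_lt]; simp only [String.toList_append]
  show List.Lex _ ['0'] ('2' :: b.toList)
  exact List.Lex.rel (by decide)

theorem pv12 (b : String) : "1" < "2" ++ b := by
  rw [String.lt_iff_toList_lt]; show List.lt _ _
  rw [List.lt_iff_lex_lt]; simp only [String.toList_append]
  show List.Lex _ ['1'] ('2' :: b.toList)
  exact List.Lex.rel (by decide)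

theorem pv23 (b : String) : "2" ++ b < "3" := by
  rw [String.lt_iff_toList_lt]; show List.lt _ _
  rw [List.lt_iff_lex_lt]; simp only [String.toList_append]
  show List.Lex _ ('2' :: b.toList) ['3']
  exact List.Lex.rel (by decide)

theorem pv22 {a b : String} (h : a < b) : "2" ++ a < "2" ++ b := by
  rw [String.lt_iff_toList_lt] at h ⊢; show List.lt _ _
  rw [List.lt_iff_lex_lt]; simp only [String.toList_append]
  show List.Lex _ ('2' :: a.toList) ('2' :: b.toList)
  exact List.Lex.cons (by rw [← List.lt_iff_lex_lt]; exact h)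

theorem pvRank_other {a : String} (h1 : a ≠ "type") (h2 : a ≠ "name")
    (h3 : a ≠ "linecol") : pvRank a = "2" ++ a := by
  simp [pvRank, h1, h2, h3]

theorem pvRank_type : pvRank "type" = "0" := rfl
theorem pvRank_name : pvRank "name" = "1" := rfl
theorem pvRank_linecol : pvRank "linecol" = "3" := rfl

theorem pv01 : ("0" : String) < "1" := by
  rw [String.lt_iff_toList_lt]; show List.lt _ _
  rw [List.lt_iff_lex_lt]
  exact List.Lex.rel (by decide)

theorem pv03 : ("0" : String) < "3" := by
  rw [String.lt_iff_toList_lt]; show List.lt _ _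
  rw [List.lt_iff_lex_lt]
  exact List.Lex.rel (by decide)

theorem pv13 : ("1" : String) < "3" := by
  rw [String.lt_iff_toList_lt]; show List.lt _ _
  rw [List.lt_iff_lex_lt]
  exact List.Lex.rel (by decide)

-- sorted-by-rank of the keys is exactly A's three groups in order
theorem pv_rank_keyorder (d : PySem.Dict String String) (hnd : d.keys.Nodup) :
    PySem.List.sorted d.keys pvRank false =
      (["type", "name"].filter (fun k => d.contains k))
      ++ PySem.List.sorted
           (PySem.Set.diff (PySem.Set.ofList d.keys) (["type", "name"] ++ ["linecol"]))
           (fun x => x) false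
      ++ (["linecol"].filter (fun k => d.contains k)) := by
  have hMmem : ∀ a : String,
      a ∈ PySem.List.sorted
            (PySem.Set.diff (PySem.Set.ofList d.keys) (["type", "name"] ++ ["linecol"]))
            (fun x => x) false ↔
        a ∈ d.keys ∧ ¬(a = "type" ∨ a = "name" ∨ a = "linecol") := by
    intro a
    rw [PySem.List.mem_sorted, PySem.Set.mem_diff, PySem.Set.mem_ofList]
    simp
  have hMnodup : (PySem.List.sorted
      (PySem.Set.diff (PySem.Set.ofList d.keys) (["type", "name"] ++ ["linecol"]))
      (fun x => x) false).Nodup :=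
    (PySem.List.sorted_perm _ _ _).symm.nodup
      (PySem.Set.nodup_diff _ _ (PySem.Set.nodup_ofList _))
  have hFmem : ∀ a : String,
      a ∈ (["type", "name"].filter (fun k => d.contains k)) ↔
        (a = "type" ∨ a = "name") ∧ a ∈ d.keys := by
    intro a
    simp only [List.mem_filter, PySem.Dict.contains_iff_mem_keys]
    simp
  have hLmem : ∀ a : String,
      a ∈ (["linecol"].filter (fun k => d.contains k)) ↔
        a = "linecol" ∧ a ∈ d.keys := by
    intro a
    simp only [List.mem_filter, PySem.Dict.contains_iff_mem_keys]
    simp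
  apply PySem.List.sorted_eq_of_perm_of_pairwise_lt
  · -- permutation with the keys
    rw [List.perm_ext_iff_of_nodup ?_ hnd]
    · intro a
      simp only [List.mem_append, hFmem, hMmem, hLmem]
      by_cases h1 : a = "type" <;> by_cases h2 : a = "name" <;>
        by_cases h3 : a = "linecol" <;> tauto
    · rw [List.nodup_append, List.nodup_append]
      refine ⟨⟨(by decide : (["type", "name"] : List String).Nodup).filter _, hMnodup, ?_⟩,
        (by decide : (["linecol"] : List String).Nodup).filter _, ?_⟩
      · intro a ha b hb
        rw [hFmem] at ha
        rw [hMmem] at hb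
        rintro rfl
        exact hb.2 (by tauto)
      · intro a ha b hb
        rw [List.mem_append, hFmem, hMmem] at ha
        rw [hLmem] at hb
        rintro rfl
        rcases ha with ha | ha
        · rcases ha.1 with h | h <;> simp [h] at hb
        · exact ha.2 (Or.inr (Or.inr hb.1))
  · -- strictly increasing rank along the three groups
    rw [List.pairwise_append, List.pairwise_append]
    refine ⟨⟨?_, ?_, ?_⟩, ?_, ?_⟩
    · refine (List.pairwise_cons.mpr ⟨?_, List.pairwise_singleton _ _⟩).filter _
      intro b hb
      rw [List.mem_singleton] at hb
      subst hb
      rw [pvRank_type, pvRank_name]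
      exact pv01
    · -- inside the middle group
      have hlt : (PySem.List.sorted
          (PySem.Set.diff (PySem.Set.ofList d.keys) (["type", "name"] ++ ["linecol"]))
          (fun x => x) false).Pairwise (fun a b => a < b) :=
        ((PySem.List.sorted_pairwise _ _).and hMnodup).imp
          (fun h => lt_of_le_of_ne h.1 h.2)
      refine hlt.imp_of_mem ?_
      intro a b ha hb hab
      rw [hMmem] at ha hb
      rw [pvRank_other (by tauto) (by tauto) (by tauto),
        pvRank_other (by tauto) (by tauto) (by tauto)]
      exact pv22 hab
    · -- first group before the middle group
      intro a ha b hb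
      rw [hFmem] at ha
      rw [hMmem] at hb
      rw [pvRank_other (a := b) (by tauto) (by tauto) (by tauto)]
      rcases ha.1 with rfl | rfl
      · rw [pvRank_type]; exact pv02 b
      · rw [pvRank_name]; exact pv12 b
    · exact (List.pairwise_singleton _ _).filter _
    · -- first two groups before "linecol"
      intro a ha b hb
      rw [List.mem_append, hFmem, hMmem] at ha
      rw [hLmem] at hb
      rw [hb.1, pvRank_linecol]
      rcases ha with ha | ha
      · rcases ha.1 with rfl | rfl
        · rw [pvRank_type]; exact pv03
        · rw [pvRank_name]; exact pv13
      · rw [pvRank_other (a := a) (by tauto) (by tauto) (by tauto)]; exact pv23 a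

-- every key of the middle group is a key of d, so A's filter there is the identity
theorem pv_filter_mid (d : PySem.Dict String String) :
    (PySem.List.sorted
        (PySem.Set.diff (PySem.Set.ofList d.keys) (["type", "name"] ++ ["linecol"]))
        (fun x => x) false).filter (fun k => d.contains k) =
      PySem.List.sorted
        (PySem.Set.diff (PySem.Set.ofList d.keys) (["type", "name"] ++ ["linecol"]))
        (fun x => x) false := by
  apply List.filter_eq_self.mpr
  intro a ha
  rw [PySem.List.mem_sorted, PySem.Set.mem_diff, PySem.Set.mem_ofList] at ha
  exact (PySem.Dict.contains_iff_mem_keys d a).mpr ha.1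

-- ===== VERDICT (by name: the statement is the Claim_ definition above) =====
theorem pretty_ordered_keys_spec : Claim_equal_pretty_ordered_keys := by
  intro dict_ _
  unfold Spec_pretty_ordered_keys pretty_ordered_keys pretty_ordered_keys_alt
  dsimp only
  rw [pv_rank_keyorder (PySem.Dict.ofList dict_) (PySem.Dict.nodup_keys_ofList dict_),
    pv_filter_mid (PySem.Dict.ofList dict_), List.map_append, List.map_append]
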